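-- pv_equiv track=rewrite | github.com/CshardZ/Practical-Python | Challenge-50-Days/Day7.py | dict_names
-- ===== SOURCE A (Python) =====
-- def dict_names(names):
-- 	name_dict = dict()
-- 	for name in names:
-- 	    if name.upper().startswith('S'):
-- 	        if name in name_dict:
-- 	            name_dict[name] += 1
-- 	        else:
-- 	            name_dict[name] = 1
-- 	return name_dict
-- ===== SOURCE B (Python) =====
-- def dict_names(names):
--     kept = [n for n in names if n.startswith(('S', 's'))]
--     return {n: kept.count(n) for n in dict.fromkeys(kept)}
-- ===== Notes on version B (the rewrite author's own statement) =====
-- stated objective: simpler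
-- what changed: B replaces A's incremental dict-increment loop by filter-then-tally: build the filtered list once, then a dict comprehension over its first-occurrence-deduplicated keys with kept.count(n) as the value.
import Mathlib
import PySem

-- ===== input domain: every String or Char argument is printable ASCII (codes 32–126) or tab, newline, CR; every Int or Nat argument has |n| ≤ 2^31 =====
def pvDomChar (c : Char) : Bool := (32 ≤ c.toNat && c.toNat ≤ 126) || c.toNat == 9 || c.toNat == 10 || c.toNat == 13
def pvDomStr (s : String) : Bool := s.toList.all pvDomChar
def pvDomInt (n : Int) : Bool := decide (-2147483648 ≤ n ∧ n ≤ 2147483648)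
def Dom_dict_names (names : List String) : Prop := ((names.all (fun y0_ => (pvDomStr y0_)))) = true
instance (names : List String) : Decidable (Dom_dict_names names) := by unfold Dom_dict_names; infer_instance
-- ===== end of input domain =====

-- B tallies the filtered names by counting over the filtered list instead of A's incremental dict increments (objective: simpler).

-- ===== PORT A =====
def dict_names (names : List String) : List (String × Int) :=
  let name_dict := names.foldl (fun d name =>
    if PySem.Str.startswith (PySem.Str.upper name) "S" then
      if d.contains name then
        d.insert name (d.getD name 0 + 1)
      else
        d.insert name 1
    else d) PySem.Dict.empty
  name_dict.items

-- ===== PORT B =====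
def dict_names_alt (names : List String) : List (String × Int) :=
  let kept := names.filter (fun n => PySem.Str.startswith n "S" || PySem.Str.startswith n "s")
  (PySem.List.dedup kept).map (fun n => (n, (kept.count n : Int)))

-- ===== PRECONDITION & SPEC =====
def Spec_dict_names (names : List String) (out : List (String × Int)) : Prop := out = dict_names_alt names
instance (names : List String) (out : List (String × Int)) : Decidable (Spec_dict_names names out) := by unfold Spec_dict_names; infer_instance

-- ===== CLAIM (what is proved, stated in full; the proofs are below) =====
def Claim_equal_dict_names : Prop := ∀ (names : List String), Dom_dict_names names → Spec_dict_names names (dict_names names)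

-- ===== LEMMAS AND PROOFS =====

theorem char_eq_iff_toNat (c d : Char) : c = d ↔ c.toNat = d.toNat := by
  constructor
  · intro h; rw [h]
  · intro h; exact Char.ext (UInt32.toNat_inj.mp h)

theorem upperChar_eq_S (c : Char) : (PySem.Chars.upperChar c == 'S') = (c == 'S' || c == 's') := by
  simp only [PySem.Chars.upperChar, PySem.Chars.islower, Char.le_def, UInt32.le_iff_toNat_le]
  have hS : ('S').toNat = 83 := rfl
  have hs : ('s').toNat = 115 := rfl
  have ha : ('a').val.toNat = 97 := rfl
  have hz : ('z').val.toNat = 122 := rfl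
  have hc : c.val.toNat = c.toNat := rfl
  split_ifs with h <;>
    simp only [Bool.and_eq_true, decide_eq_true_eq, not_and, not_le, ha, hz, hc] at h <;>
    rw [Bool.eq_iff_iff] <;>
    simp only [Bool.or_eq_true, beq_iff_eq, char_eq_iff_toNat, hS, hs]
  · have hval : (c.toNat - 32).isValidChar := by left; omega
    rw [Char.toNat_ofNat, if_pos hval]
    obtain ⟨h1, h2⟩ := h
    constructor
    · intro hx; right; omega
    · rintro (hx | hx) <;> omega
  · constructor
    · intro hx; left; exact hx
    · rintro (hx | hx)
      · exact hx
      · exfalso; have := h (by omega); omega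

-- A's filter test equals B's: upper(s) starts with 'S' iff s starts with 'S' or with 's'.
theorem cond_eq (s : String) :
    PySem.Str.startswith (PySem.Str.upper s) "S"
      = (PySem.Str.startswith s "S" || PySem.Str.startswith s "s") := by
  simp only [PySem.Str.startswith_eq, PySem.Str.toList_upper]
  have hS : ("S" : String).toList = ['S'] := rfl
  have hs : ("s" : String).toList = ['s'] := rfl
  rw [hS, hs]
  cases s.toList with
  | nil => rfl
  | cons c t =>
    simp only [PySem.Chars.upper, List.map_cons, PySem.Chars.startswith, List.isPrefixOf, Bool.and_true]
    have h1 : ('S' == PySem.Chars.upperChar c) = (PySem.Chars.upperChar c == 'S') := by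
      rw [Bool.eq_iff_iff, beq_iff_eq, beq_iff_eq]; exact eq_comm
    have h2 : ('S' == c) = (c == 'S') := by rw [Bool.eq_iff_iff, beq_iff_eq, beq_iff_eq]; exact eq_comm
    have h3 : ('s' == c) = (c == 's') := by rw [Bool.eq_iff_iff, beq_iff_eq, beq_iff_eq]; exact eq_comm
    rw [h1, h2, h3, upperChar_eq_S]

-- A's loop body, once the test holds, is the counter step d.insert name (d.getD name 0 + 1).
theorem body_eq (d : PySem.Dict String Int) (name : String) :
    (if d.contains name then d.insert name (d.getD name 0 + 1) else d.insert name 1)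
      = d.insert name (d.getD name 0 + 1) := by
  by_cases h : d.contains name = true
  · rw [if_pos h]
  · rw [if_neg h, PySem.Dict.getD_of_not_contains d 0 (by simpa using h)]; norm_num

-- ===== VERDICT (by name: the statement is the Claim_ definition above) =====
theorem dict_names_spec : Claim_equal_dict_names := by
  intro names _
  unfold Spec_dict_names dict_names dict_names_alt
  dsimp only
  have hstep : ∀ (d : PySem.Dict String Int) (name : String), name ∈ names →
      (if PySem.Str.startswith (PySem.Str.upper name) "S" then
        if d.contains name then d.insert name (d.getD name 0 + 1) else d.insert name 1
      else d)
      = (if (PySem.Str.startswith name "S" || PySem.Str.startswith name "s") then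
          d.insert name (d.getD name 0 + 1) else d) := by
    intro d name _
    rw [cond_eq, body_eq]
  rw [PySem.List.foldl_congr_mem _ _ _ _ hstep, PySem.List.foldl_if_eq_foldl_filter,
    PySem.Dict.foldl_insert_getD_add_one_eq_counter, PySem.Dict.items_counter,
    PySem.List.dedup_eq_ofList]
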